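-- pv_equiv track=rewrite | github.com/h-spear/problem-solving-python | programmers/level3/representable_binary_tree.py | solution
-- ===== SOURCE A (Python) =====
-- def left_child(i, height):
--     return i - 2 ** (height - 1)
--
-- def right_child(i, height):
--     return i + 2 ** (height - 1)
--
-- def is_valid_tree(binary_number, node, height):
--     if height <= 0:
--         return True
--
--     left_node = left_child(node, height)
--     right_node = right_child(node, height)
--
--     left = is_valid_tree(binary_number, left_node, height - 1)
--     right = is_valid_tree(binary_number, right_node, height - 1)
--
--     if not left or not right:
--         return False
--
--     if binary_number[node] == "0":
--         if binary_number[left_node] == "1":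
--             return False
--         if binary_number[right_node] == "1":
--             return False
--
--     return True
--
-- def solution(numbers):
--     answer = []
--     for number in numbers:
--         binary_number = bin(number)[2:]
--         binary_length = len(binary_number)
--
--         for i in range(1, 7):
--             if (2 ** i - 1) < binary_length:
--                 continue
--             else:
--                 zerofill = binary_number.zfill(2 ** i - 1)
--                 if is_valid_tree(zerofill, len(zerofill) // 2, i - 1):
--                     answer.append(1)
--                     break
--         else:
--             answer.append(0)
--
--     return answer
-- ===== SOURCE B (Python) =====
-- def solution(numbers):
--     answer = []
--     for number in numbers:
--         s = bin(number)[2:]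
--         res = 0
--         for i in range(1, 7):
--             size = 2 ** i - 1
--             if size < len(s):
--                 continue
--             z = s.zfill(size)
--             if all(not (z[p] == '0' and (z[p - 2 ** (h - 1)] == '1' or z[p + 2 ** (h - 1)] == '1'))
--                    for h in range(1, i)
--                    for p in range(2 ** h - 1, size, 2 ** (h + 1))):
--                 res = 1
--                 break
--         answer.append(res)
--     return answer
-- ===== Notes on version B (the rewrite author's own statement) =====
-- stated objective: faster
-- what changed: The recursive is_valid_tree over subtrees is replaced by an iterative level-order sweep: for each level h an arithmetic-progression scan over the in-order positions of that level checks every '0' node against its two children, aggregated with a single all(...); the per-number search keeps the same smallest-fit zfill loop.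
import Mathlib
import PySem

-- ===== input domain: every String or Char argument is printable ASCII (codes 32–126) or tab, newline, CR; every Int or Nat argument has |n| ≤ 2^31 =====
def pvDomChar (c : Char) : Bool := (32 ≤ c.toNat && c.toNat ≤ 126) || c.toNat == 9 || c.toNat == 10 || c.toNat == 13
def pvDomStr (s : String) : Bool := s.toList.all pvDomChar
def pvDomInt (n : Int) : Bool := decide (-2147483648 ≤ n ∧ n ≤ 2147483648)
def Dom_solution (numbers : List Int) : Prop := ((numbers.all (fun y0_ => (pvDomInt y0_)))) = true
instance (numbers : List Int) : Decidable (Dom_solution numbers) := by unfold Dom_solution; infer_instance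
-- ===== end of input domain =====

-- B replaces A's recursive per-subtree validity check with an iterative level-order sweep over
-- the in-order positions of each level (objective: faster by a constant factor, as measured).

-- ===== PORT A =====
-- is_valid_tree(binary_number, node, height); left_child/right_child inlined as lets
def isValidTree (z : List Char) (node : Int) : Nat → Bool
  | 0 => true          -- height <= 0
  | h + 1 =>
    let leftNode := node - 2 ^ h
    let rightNode := node + 2 ^ h
    let left := isValidTree z leftNode h
    let right := isValidTree z rightNode h
    if !left || !right then false
    else if PySem.List.pyGet? z node = some '0' then
      if PySem.List.pyGet? z leftNode = some '1' then false
      else if PySem.List.pyGet? z rightNode = some '1' then false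
      else true
    else true

-- the 'for i in range(1,7) … break / else: append(0)' search (returns the appended 0/1)
def fitLoopA (bn : List Char) (blen : Nat) : List Nat → Int
  | [] => 0                                   -- the for-else: no break happened
  | i :: rest =>
    if 2 ^ i - 1 < blen then fitLoopA bn blen rest
    else
      let zerofill := PySem.Chars.zfill bn ((2:Int) ^ i - 1)
      if isValidTree zerofill (PySem.Int.floordiv (zerofill.length : Int) 2) (i - 1) then 1
      else fitLoopA bn blen rest

def solLoopA (acc : List Int) : List Int → List Int
  | [] => acc
  | number :: rest =>
    let bn := (PySem.Int.toBinChars0b number).drop 2      -- bin(number)[2:]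
    solLoopA (acc ++ [fitLoopA bn bn.length (List.range' 1 6)]) rest

def solution (numbers : List Int) : List Int := solLoopA [] numbers

-- ===== PORT B =====
-- not (z[p]=='0' and (z[p-step]=='1' or z[p+step]=='1'))
def nodeOk (z : List Char) (step p : Int) : Bool :=
  !(decide (PySem.List.pyGet? z p = some '0') &&
    (decide (PySem.List.pyGet? z (p - step) = some '1') ||
     decide (PySem.List.pyGet? z (p + step) = some '1')))

-- the all(...) generator over h in range(1,i) and p in range(2**h-1, size, 2**(h+1))
def checkAlt (z : List Char) (i : Nat) : Bool :=
  (List.range' 1 (i - 1)).all fun h =>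
    (PySem.List.pyRange ((2:Int) ^ h - 1) ((2:Int) ^ i - 1) ((2:Int) ^ (h + 1))).all fun p =>
      nodeOk z ((2:Int) ^ (h - 1)) p

def fitLoopB (s : List Char) : List Nat → Int
  | [] => 0
  | i :: rest =>
    if 2 ^ i - 1 < s.length then fitLoopB s rest
    else if checkAlt (PySem.Chars.zfill s ((2:Int) ^ i - 1)) i then 1
    else fitLoopB s rest

def solution_alt (numbers : List Int) : List Int :=
  numbers.map fun number => fitLoopB ((PySem.Int.toBinChars0b number).drop 2) (List.range' 1 6)

-- ===== PRECONDITION & SPEC =====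
def Spec_solution (numbers : List Int) (out : List Int) : Prop := out = solution_alt numbers
instance (numbers : List Int) (out : List Int) : Decidable (Spec_solution numbers out) := by unfold Spec_solution; infer_instance

-- ===== CLAIM (what is proved, stated in full; the proofs are below) =====
def Claim_equal_solution : Prop := ∀ (numbers : List Int), Dom_solution numbers → Spec_solution numbers (solution numbers)

-- ===== LEMMAS AND PROOFS =====

-- arithmetic progression a, a+s, …, n terms
def prog (a s : Int) : Nat → List Int
  | 0 => []
  | n + 1 => a :: prog (a + s) s n

theorem prog_append (s : Int) (m : Nat) : ∀ (n : Nat) (a : Int),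
    prog a s (m + n) = prog a s m ++ prog (a + m * s) s n := by
  induction m with
  | zero => intro n a; simp [prog]
  | succ k ih =>
    intro n a
    have e : k + 1 + n = (k + n) + 1 := by omega
    rw [e]
    simp only [prog, List.cons_append]
    rw [ih n (a + s)]
    have e2 : a + s + (k : Int) * s = a + ((k + 1 : Nat) : Int) * s := by push_cast; ring
    rw [e2]

theorem all_congr' {α : Type} (l : List α) (f g : α → Bool)
    (h : ∀ x ∈ l, f x = g x) : l.all f = l.all g := by
  induction l with
  | nil => rfl
  | cons x xs ih =>
    simp only [List.all_cons, h x (by simp), ih (fun y hy => h y (by simp [hy]))]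

theorem all_list_congr {α : Type} {l1 l2 : List α} (f : α → Bool) (h : l1 = l2) :
    l1.all f = l2.all f := by rw [h]

theorem all_and {α : Type} (l : List α) (f g : α → Bool) :
    (l.all fun x => f x && g x) = (l.all f && l.all g) := by
  induction l with
  | nil => rfl
  | cons x xs ih => simp only [List.all_cons, ih]; cases f x <;> cases g x <;> simp

-- A's subtree check as a conjunction over the levels of the subtree rooted at r of height h
def treeAll (z : List Char) (r : Int) (h : Nat) : Bool :=
  (List.range' 1 h).all fun j =>
    (prog (r - 2 ^ h + 2 ^ j) (2 ^ (j + 1)) (2 ^ (h - j))).all fun p =>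
      nodeOk z ((2:Int) ^ (j - 1)) p

theorem validTree_succ (z : List Char) (r : Int) (h : Nat) :
    isValidTree z r (h + 1) =
      ((isValidTree z (r - 2 ^ h) h && isValidTree z (r + 2 ^ h) h) &&
        nodeOk z ((2:Int) ^ h) r) := by
  simp only [isValidTree, nodeOk]
  cases isValidTree z (r - 2 ^ h) h <;> cases isValidTree z (r + 2 ^ h) h <;>
    simp only [Bool.not_true, Bool.not_false, Bool.or_true, Bool.or_false,
      Bool.true_and, Bool.false_and, Bool.and_true, Bool.and_false, if_true] <;>
    split_ifs <;> simp_all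

theorem key (z : List Char) : ∀ (h : Nat) (r : Int), isValidTree z r h = treeAll z r h := by
  intro h
  induction h with
  | zero => intro r; simp [isValidTree, treeAll]
  | succ h ih =>
    intro r
    rw [validTree_succ, ih, ih]
    unfold treeAll
    rw [List.range'_1_concat, List.all_append]
    simp only [List.all_cons, List.all_nil, Bool.and_true]
    have hlast : ((prog (r - 2 ^ (h + 1) + 2 ^ (1 + h)) (2 ^ (1 + h + 1)) (2 ^ (h + 1 - (1 + h)))).all
        fun p => nodeOk z ((2:Int) ^ (1 + h - 1)) p) = nodeOk z ((2:Int) ^ h) r := by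
      have e1 : h + 1 - (1 + h) = 0 := by omega
      have e2 : 1 + h - 1 = h := by omega
      have e3 : r - 2 ^ (h + 1) + 2 ^ (1 + h) = r := by
        have : (2:Int) ^ (1 + h) = 2 ^ (h + 1) := by ring_nf
        rw [this]; ring
      rw [e1, e2, e3]
      simp [prog]
    rw [hlast]
    have hmain : ((List.range' 1 h).all fun j =>
        (prog (r - 2 ^ (h + 1) + 2 ^ j) (2 ^ (j + 1)) (2 ^ (h + 1 - j))).all fun p =>
          nodeOk z ((2:Int) ^ (j - 1)) p) =
        (((List.range' 1 h).all fun j =>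
          (prog (r - 2 ^ h - 2 ^ h + 2 ^ j) (2 ^ (j + 1)) (2 ^ (h - j))).all fun p =>
            nodeOk z ((2:Int) ^ (j - 1)) p) &&
         ((List.range' 1 h).all fun j =>
          (prog (r + 2 ^ h - 2 ^ h + 2 ^ j) (2 ^ (j + 1)) (2 ^ (h - j))).all fun p =>
            nodeOk z ((2:Int) ^ (j - 1)) p)) := by
      rw [← all_and]
      apply all_congr'
      intro j hj
      obtain ⟨hj1, hj2⟩ : 1 ≤ j ∧ j ≤ h := by
        rcases List.mem_range'_1.mp hj with ⟨h1, h2⟩; omega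
      have hpow : (2:Nat) ^ (h + 1 - j) = 2 ^ (h - j) + 2 ^ (h - j) := by
        have e : h + 1 - j = (h - j) + 1 := by omega
        rw [e, pow_succ]; ring
      rw [hpow, prog_append]
      rw [List.all_append]
      congr 1
      · congr 2; ring
      · congr 2
        push_cast
        rw [show ((2:Int) ^ (h - j) * 2 ^ (j + 1)) = 2 ^ (h + 1) by
          rw [← pow_add]; congr 1; omega]
        rw [show ((2:Int) ^ (h + 1)) = 2 ^ h + 2 ^ h by rw [pow_succ]; ring]
        ring
    rw [hmain]

-- per-i bridge: A's rooted check equals B's level sweep, for the six concrete sizes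
theorem bridge (i : Nat) (hi : i ∈ List.range' 1 6) (z : List Char) :
    isValidTree z (2 ^ (i - 1) - 1) (i - 1) = checkAlt z i := by
  rw [key]
  unfold treeAll checkAlt
  fin_cases hi <;> apply all_congr' <;> intro j hj <;> fin_cases hj <;>
    exact all_list_congr _ (by decide)

theorem fit_eq (bn : List Char) : ∀ (l : List Nat), l ⊆ List.range' 1 6 →
    fitLoopA bn bn.length l = fitLoopB bn l := by
  intro l
  induction l with
  | nil => intro _; rfl
  | cons i rest ih =>
    intro hsub
    have hi : i ∈ List.range' 1 6 := hsub (by simp)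
    have hrest := ih (fun x hx => hsub (by simp [hx]))
    have hi' : 1 ≤ i ∧ i ≤ 6 := by rcases List.mem_range'_1.mp hi with ⟨h1, h2⟩; omega
    simp only [fitLoopA, fitLoopB]
    by_cases hlt : 2 ^ i - 1 < bn.length
    · rw [if_pos hlt, if_pos hlt, hrest]
    · rw [if_neg hlt, if_neg hlt]
      have hzlen : (PySem.Chars.zfill bn ((2:Int) ^ i - 1)).length = 2 ^ i - 1 := by
        have h1 : (1:Nat) ≤ 2 ^ i := Nat.one_le_two_pow
        have ht : ((2:Int) ^ i - 1).toNat = 2 ^ i - 1 := by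
          rw [show ((2:Int) ^ i - 1) = ((2 ^ i - 1 : Nat) : Int) by
            push_cast [Nat.cast_sub h1]; ring]
          exact Int.toNat_natCast _
        rw [PySem.Chars.length_zfill, ht]
        omega
      have hnode : PySem.Int.floordiv ((PySem.Chars.zfill bn ((2:Int) ^ i - 1)).length : Int) 2
          = 2 ^ (i - 1) - 1 := by
        rw [hzlen]
        fin_cases hi <;> decide
      rw [hnode, bridge i hi, hrest]

theorem solLoopA_eq (ns : List Int) : ∀ (acc : List Int),
    solLoopA acc ns = acc ++ solution_alt ns := by
  induction ns with
  | nil => intro acc; simp [solLoopA, solution_alt]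
  | cons n rest ih =>
    intro acc
    simp only [solLoopA, solution_alt, List.map_cons]
    rw [ih, fit_eq _ _ (fun x hx => hx)]
    simp [solution_alt]

-- ===== VERDICT (by name: the statement is the Claim_ definition above) =====
theorem solution_spec : Claim_equal_solution := by
  intro numbers _
  unfold Spec_solution solution
  rw [solLoopA_eq]
  simp
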